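-- pv_equiv track=rewrite | github.com/suyeon-K/BAEKJOON-study | 42584_programmers_stack_queue.py | solution
-- ===== SOURCE A (Python) =====
-- def solution(prices):
--     answer = [0] *len(prices)
--
--     for i in range(len(prices)):
--         for j in range(i+1, len(prices)):
--             answer[i] += 1
--             if prices[j] < prices[i]:
--                 break
--
--     return answer
-- ===== SOURCE B (Python) =====
-- def solution(prices):
--     n = len(prices)
--     answer = [0] * n
--     stack = []  # indices of a strictly increasing (in price, top-first) chain to the right
--     for i in range(n - 1, -1, -1):
--         while stack and prices[stack[-1]] >= prices[i]:
--             stack.pop()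
--         answer[i] = (stack[-1] - i) if stack else (n - 1 - i)
--         stack.append(i)
--     return answer
-- ===== Notes on version B (the rewrite author's own statement) =====
-- stated objective: faster
-- what changed: Replaced the nested forward scan (restarting from i+1 for every i) by a single right-to-left pass with a monotonic stack of indices: each index is pushed and popped at most once, and the answer is read off the stack top.
import Mathlib
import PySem

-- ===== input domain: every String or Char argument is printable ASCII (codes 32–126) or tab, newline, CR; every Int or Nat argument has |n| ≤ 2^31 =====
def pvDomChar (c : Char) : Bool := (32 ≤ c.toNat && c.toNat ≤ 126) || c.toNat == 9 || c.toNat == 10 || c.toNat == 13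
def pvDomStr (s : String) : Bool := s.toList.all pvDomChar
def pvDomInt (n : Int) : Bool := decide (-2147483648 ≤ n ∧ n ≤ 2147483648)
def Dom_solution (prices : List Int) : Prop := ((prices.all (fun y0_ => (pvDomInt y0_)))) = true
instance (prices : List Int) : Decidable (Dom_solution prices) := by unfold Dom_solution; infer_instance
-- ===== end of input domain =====

-- B replaces A's O(n^2) nested scan by a single right-to-left pass with a monotonic
-- stack of indices (each index pushed/popped once); objective: faster (asymptotic).

-- ===== PORT A =====
-- inner loop `for j in range(j0, len(prices)): answer[i] += 1; if prices[j] < p: break`,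
-- fuel = number of remaining iterations; indices are always in range so getD is exact.
def aInner (prices : List Int) (p : Int) : Nat → Nat → Int
  | _, 0 => 0
  | j, fuel+1 => 1 + (if prices.getD j 0 < p then 0 else aInner prices p (j+1) fuel)

def solution (prices : List Int) : List Int :=
  (List.range prices.length).map (fun i =>
    aInner prices (prices.getD i 0) (i+1) (prices.length - (i+1)))

-- ===== PORT B =====
-- one step of B's loop body at index i: pop while prices[stack[-1]] >= prices[i]
-- (dropWhile transcribes the while-pop), read the answer off the top, push i.
def bStep (prices : List Int) (i : Nat) (st : List Nat) (ans : List Int) :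
    List Nat × List Int :=
  let st' := st.dropWhile (fun j => decide (prices.getD j 0 ≥ prices.getD i 0))
  let a : Int :=
    match st' with
    | [] => (prices.length : Int) - 1 - (i : Int)
    | j :: _ => (j : Int) - (i : Int)
  (i :: st', a :: ans)

-- `for i in range(n-1, -1, -1)`: after m iterations the indices n-1 … n-m are done.
def bLoop (prices : List Int) : Nat → List Nat × List Int
  | 0 => ([], [])
  | m+1 =>
    let s := bLoop prices m
    bStep prices (prices.length - (m+1)) s.1 s.2

def solution_alt (prices : List Int) : List Int := (bLoop prices prices.length).2

-- ===== PRECONDITION & SPEC =====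
def Spec_solution (prices : List Int) (out : List Int) : Prop := out = solution_alt prices
instance (prices : List Int) (out : List Int) : Decidable (Spec_solution prices out) := by unfold Spec_solution; infer_instance

-- ===== CLAIM (what is proved, stated in full; the proofs are below) =====
def Claim_equal_solution : Prop := ∀ (prices : List Int), Dom_solution prices → Spec_solution prices (solution prices)

-- ===== LEMMAS AND PROOFS =====

-- first index k ≥ j (within fuel) with prices[k] < p
def firstLt (prices : List Int) (p : Int) : Nat → Nat → Option Nat
  | _, 0 => none
  | j, fuel+1 => if prices.getD j 0 < p then some j else firstLt prices p (j+1) fuel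

-- the intended value of answer[i]
def ansSpec (prices : List Int) (i : Nat) : Int :=
  match firstLt prices (prices.getD i 0) (i+1) (prices.length - (i+1)) with
  | some j => (j : Int) - (i : Int)
  | none => (prices.length : Int) - 1 - (i : Int)

-- the chain i, nsi(i), nsi(nsi(i)), … of successive next-smaller indices
def chain (prices : List Int) : Nat → Nat → List Nat
  | _, 0 => []
  | i, fuel+1 =>
    i :: (match firstLt prices (prices.getD i 0) (i+1) (prices.length - (i+1)) with
          | none => []
          | some j => chain prices j fuel)

def Chain (prices : List Int) (i : Nat) : List Nat :=
  chain prices i (prices.length - i)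

theorem aInner_eq (prices : List Int) (p : Int) :
    ∀ fuel j, aInner prices p j fuel =
      (match firstLt prices p j fuel with
       | some k => (k : Int) - (j : Int) + 1
       | none => (fuel : Int)) := by
  intro fuel
  induction fuel with
  | zero => intro j; simp [aInner, firstLt]
  | succ f ih =>
    intro j
    by_cases h : prices.getD j 0 < p
    · show (1 + if prices.getD j 0 < p then 0 else aInner prices p (j+1) f) =
        (match (if prices.getD j 0 < p then some j else firstLt prices p (j+1) f) with
         | some k => (k : Int) - (j : Int) + 1
         | none => ((f+1 : Nat) : Int))
      rw [if_pos h, if_pos h]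
      show (1:Int) + 0 = (j : Int) - (j : Int) + 1
      omega
    · simp only [aInner, firstLt, if_neg h, ih (j+1)]
      cases hf : firstLt prices p (j+1) f with
      | none => push_cast; ring
      | some k => push_cast; ring

theorem firstLt_eq_some (prices : List Int) (p : Int) :
    ∀ fuel j k, firstLt prices p j fuel = some k ↔
      (j ≤ k ∧ k < j + fuel ∧ prices.getD k 0 < p ∧
       ∀ l, j ≤ l → l < k → ¬ prices.getD l 0 < p) := by
  intro fuel
  induction fuel with
  | zero => intro j k; simp [firstLt]; omega
  | succ f ih =>
    intro j k
    by_cases h : prices.getD j 0 < p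
    · simp only [firstLt, if_pos h]
      constructor
      · rintro ⟨rfl⟩
        exact ⟨le_refl _, by omega, h, fun l hl1 hl2 => by omega⟩
      · rintro ⟨h1, h2, h3, h4⟩
        have : j = k := by
          by_contra hne
          exact h4 j le_rfl (by omega) h
        simp [this]
    · simp only [firstLt, if_neg h, ih (j+1) k]
      constructor
      · rintro ⟨h1, h2, h3, h4⟩
        refine ⟨by omega, by omega, h3, fun l hl1 hl2 => ?_⟩
        rcases Nat.eq_or_lt_of_le hl1 with rfl | hlt
        · exact h
        · exact h4 l (by omega) hl2
      · rintro ⟨h1, h2, h3, h4⟩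
        have hjk : j ≠ k := by rintro rfl; exact h h3
        exact ⟨by omega, by omega, h3, fun l hl1 hl2 => h4 l (by omega) hl2⟩

theorem firstLt_eq_none (prices : List Int) (p : Int) :
    ∀ fuel j, firstLt prices p j fuel = none ↔
      (∀ l, j ≤ l → l < j + fuel → ¬ prices.getD l 0 < p) := by
  intro fuel
  induction fuel with
  | zero => intro j; simp [firstLt]; omega
  | succ f ih =>
    intro j
    by_cases h : prices.getD j 0 < p
    · simp only [firstLt, if_pos h]
      constructor
      · intro hc; exact absurd hc (by simp)
      · intro hall; exact absurd h (hall j le_rfl (by omega))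
    · simp only [firstLt, if_neg h, ih (j+1)]
      constructor
      · intro hall l hl1 hl2
        rcases Nat.eq_or_lt_of_le hl1 with rfl | hlt
        · exact h
        · exact hall l (by omega) (by omega)
      · intro hall l hl1 hl2
        exact hall l (by omega) (by omega)

-- shifting the start of the search past a region with no hits
theorem firstLt_shift (prices : List Int) (p : Int) (a b : Nat)
    (hab : a ≤ b) (hb : b ≤ prices.length)
    (h : ∀ l, a ≤ l → l < b → ¬ prices.getD l 0 < p) :
    firstLt prices p a (prices.length - a) = firstLt prices p b (prices.length - b) := by
  cases hfb : firstLt prices p b (prices.length - b) with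
  | none =>
    rw [firstLt_eq_none] at hfb ⊢
    intro l hl1 hl2
    by_cases hlb : l < b
    · exact h l hl1 hlb
    · exact hfb l (by omega) (by omega)
  | some k =>
    rw [firstLt_eq_some] at hfb ⊢
    obtain ⟨h1, h2, h3, h4⟩ := hfb
    refine ⟨by omega, by omega, h3, fun l hl1 hl2 => ?_⟩
    by_cases hlb : l < b
    · exact h l hl1 hlb
    · exact h4 l (by omega) hl2

theorem chain_fuel (prices : List Int) :
    ∀ f, ∀ i f', i < prices.length → prices.length ≤ i + f → prices.length ≤ i + f' →
      chain prices i f = chain prices i f' := by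
  intro f
  induction f with
  | zero => intro i f' hi hf hf'; omega
  | succ g ih =>
    intro i f' hi hf hf'
    cases f' with
    | zero => omega
    | succ g' =>
      simp only [chain]
      cases hfl : firstLt prices (prices.getD i 0) (i+1) (prices.length - (i+1)) with
      | none => rfl
      | some k =>
        rw [firstLt_eq_some] at hfl
        obtain ⟨h1, h2, _, _⟩ := hfl
        simp only [List.cons.injEq, true_and]
        exact ih k g' (by omega) (by omega) (by omega)

-- popping entries with price ≥ p from a chain lands exactly on the first index < p
theorem chain_pop (prices : List Int) (p : Int) :
    ∀ j, (Chain prices j).dropWhile (fun k => decide (prices.getD k 0 ≥ p)) =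
      (match firstLt prices p j (prices.length - j) with
       | none => []
       | some k => Chain prices k) := by
  intro j
  by_cases hj : prices.length ≤ j
  · have h0 : prices.length - j = 0 := by omega
    simp [Chain, h0, chain, firstLt]
  · have hj : j < prices.length := Nat.lt_of_not_le hj
    -- strong induction on prices.length - j
    have H : ∀ m, ∀ j, j < prices.length → prices.length - j ≤ m →
        (Chain prices j).dropWhile (fun k => decide (prices.getD k 0 ≥ p)) =
          (match firstLt prices p j (prices.length - j) with
           | none => []
           | some k => Chain prices k) := by
      intro m
      induction m with
      | zero => intro j hjn hm; omega
      | succ m ih =>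
        intro j hjn hm
        have hfj : prices.length - j = (prices.length - (j+1)) + 1 := by omega
        have hhd : Chain prices j = j :: (match firstLt prices (prices.getD j 0) (j+1) (prices.length - (j+1)) with
            | none => [] | some k => chain prices k (prices.length - (j+1))) := by
          rw [Chain, hfj]; rfl
        by_cases hlt : prices.getD j 0 < p
        · -- head already below p: nothing is popped, and firstLt hits j at once
          have hfl : firstLt prices p j (prices.length - j) = some j := by
            rw [hfj]; simp only [firstLt]; rw [if_pos hlt]
          rw [hfl]
          have hcond : decide (prices.getD j 0 ≥ p) = false := by
            rw [decide_eq_false_iff_not]; exact not_le.mpr hlt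
          rw [hhd, List.dropWhile_cons, hcond, if_neg (by simp), ← hhd]
        · -- head popped
          have hlt' : p ≤ prices.getD j 0 := not_lt.mp hlt
          have hcond : decide (prices.getD j 0 ≥ p) = true := by
            rw [decide_eq_true_iff]; exact hlt'
          cases hfl : firstLt prices (prices.getD j 0) (j+1) (prices.length - (j+1)) with
          | none =>
            -- no later index below prices[j]; since p ≤ prices[j], none below p either
            have hhd2 : Chain prices j = [j] := by rw [hhd, hfl]
            have hnone : firstLt prices p j (prices.length - j) = none := by
              rw [firstLt_eq_none]
              intro l hl1 hl2
              rcases Nat.eq_or_lt_of_le hl1 with rfl | hlt2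
              · exact hlt
              · rw [firstLt_eq_none] at hfl
                have := hfl l (by omega) (by omega)
                omega
            rw [hhd2, hnone, List.dropWhile_cons, hcond, if_pos rfl, List.dropWhile_nil]
          | some k =>
            obtain ⟨h1, h2, h3, h4⟩ := (firstLt_eq_some prices (prices.getD j 0) _ _ _).mp hfl
            have hkn : k < prices.length := by omega
            have hchain : chain prices k (prices.length - (j+1)) = Chain prices k := by
              rw [Chain]; exact chain_fuel prices _ k _ hkn (by omega) (by omega)
            have hhd2 : Chain prices j = j :: Chain prices k := by
              rw [hhd, hfl]; exact congrArg (fun t => j :: t) hchain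
            rw [hhd2, List.dropWhile_cons, hcond, if_pos rfl, ih k hkn (by omega)]
            have hshift : firstLt prices p j (prices.length - j) =
                firstLt prices p k (prices.length - k) := by
              apply firstLt_shift prices p j k (by omega) (by omega)
              intro l hl1 hl2
              rcases Nat.eq_or_lt_of_le hl1 with rfl | hlt2
              · exact hlt
              · have := h4 l (by omega) hl2
                omega
            rw [hshift]
    exact H (prices.length - j) j hj le_rfl

theorem bLoop_eq (prices : List Int) :
    ∀ m, m ≤ prices.length →
      bLoop prices m = (Chain prices (prices.length - m),
        (List.range' (prices.length - m) m).map (ansSpec prices)) := by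
  intro m
  induction m with
  | zero =>
    intro _
    have h0 : prices.length - prices.length = 0 := by omega
    simp [bLoop, Chain, chain]
  | succ m ih =>
    intro hm
    have hi1 : prices.length - m = (prices.length - (m+1)) + 1 := by omega
    set i := prices.length - (m+1) with hidef
    have hin : i < prices.length := by omega
    have hx : prices.length - i = (prices.length - (i+1)) + 1 := by omega
    have hrange : List.range' i (m+1) = i :: List.range' (i+1) m := by
      rw [List.range'_succ]
    have hstep : bLoop prices (m+1) =
        bStep prices i (Chain prices (i+1))
          ((List.range' (i+1) m).map (ansSpec prices)) := by
      simp only [bLoop]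
      rw [ih (by omega), hi1]
    rw [hstep]
    simp only [bStep]
    rw [chain_pop prices (prices.getD i 0) (i+1)]
    cases hfl : firstLt prices (prices.getD i 0) (i+1) (prices.length - (i+1)) with
    | none =>
      have h1 : Chain prices i = [i] := by
        rw [Chain, hx]
        simp only [chain]
        rw [hfl]
      have h2 : ansSpec prices i = (prices.length : Int) - 1 - (i : Int) := by
        unfold ansSpec
        rw [hfl]
      rw [hrange, List.map_cons, h1, h2]
    | some k =>
      obtain ⟨h1, h2, h3, h4⟩ :=
        (firstLt_eq_some prices (prices.getD i 0) _ _ _).mp hfl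
      have hkn : k < prices.length := by omega
      have hxk : prices.length - k = (prices.length - (k+1)) + 1 := by omega
      have ht : Chain prices k = k ::
          (match firstLt prices (prices.getD k 0) (k+1) (prices.length - (k+1)) with
           | none => [] | some j => chain prices j (prices.length - (k+1))) := by
        rw [Chain, hxk]
        simp only [chain]
      have hchain : chain prices k (prices.length - (i+1)) = Chain prices k := by
        rw [Chain]
        exact chain_fuel prices _ k _ hkn (by omega) (by omega)
      have hchaini : Chain prices i = i :: Chain prices k := by
        rw [Chain, hx]
        simp only [chain]
        rw [hfl]
        exact congrArg (fun t => i :: t) hchain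
      have hans : (match Chain prices k with
          | [] => (prices.length : Int) - 1 - (i : Int)
          | j :: _ => (j : Int) - (i : Int)) = ansSpec prices i := by
        rw [ht]
        unfold ansSpec
        rw [hfl]
      -- reduce the matches on `some k`
      show (i :: Chain prices k,
            (match Chain prices k with
             | [] => (prices.length : Int) - 1 - (i : Int)
             | j :: _ => (j : Int) - (i : Int)) :: (List.range' (i+1) m).map (ansSpec prices)) =
           (Chain prices i, (List.range' i (m+1)).map (ansSpec prices))
      rw [hans, hchaini, hrange, List.map_cons]

theorem solution_eq (prices : List Int) :
    solution prices = (List.range prices.length).map (ansSpec prices) := by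
  rw [solution]
  apply List.map_congr_left
  intro i hi
  rw [List.mem_range] at hi
  rw [aInner_eq, ansSpec]
  cases hfl : firstLt prices (prices.getD i 0) (i+1) (prices.length - (i+1)) with
  | none =>
    have : ((prices.length - (i+1) : Nat) : Int) = (prices.length : Int) - 1 - i := by omega
    simp [this]
  | some k =>
    show (k : Int) - ((i+1 : Nat) : Int) + 1 = (k : Int) - (i : Int)
    push_cast
    ring

-- ===== VERDICT (by name: the statement is the Claim_ definition above) =====
theorem solution_spec : Claim_equal_solution := by
  intro prices _
  unfold Spec_solution solution_alt
  rw [bLoop_eq prices prices.length le_rfl, solution_eq]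
  have h0 : prices.length - prices.length = 0 := by omega
  rw [h0, List.range_eq_range']
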